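-- pv_equiv track=rewrite | github.com/pypi-data/pypi-mirror-200 | packages/EmulsiPred/EmulsiPred-0.0.3.tar.gz/EmulsiPred-0.0.3/EmulsiPred/utils.py | charge_counter
-- ===== SOURCE A (Python) =====
-- def charge_counter(seq):
--     neg = 0
--     pos = 0
--     for res in range(len(seq)):
--         if seq[res] == 'D' or seq[res] =='E':
--             neg += 1
--         elif seq[res] == 'R' or seq[res] == 'K':
--             pos += 1
--
--     return pos - neg
-- ===== SOURCE B (Python) =====
-- def charge_counter(seq):
--     # Build the full residue histogram once, then combine four fixed lookups.
--     hist = {}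
--     for ch in seq:
--         hist[ch] = hist.get(ch, 0) + 1
--     return hist.get('R', 0) + hist.get('K', 0) - hist.get('D', 0) - hist.get('E', 0)
-- ===== Notes on version B (the rewrite author's own statement) =====
-- stated objective: idiomatic
-- what changed: Replaced the index-driven loop with two branch counters by a single pass that builds a complete character histogram (dict), followed by a fixed four-lookup arithmetic combination R+K-D-E.
import Mathlib
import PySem

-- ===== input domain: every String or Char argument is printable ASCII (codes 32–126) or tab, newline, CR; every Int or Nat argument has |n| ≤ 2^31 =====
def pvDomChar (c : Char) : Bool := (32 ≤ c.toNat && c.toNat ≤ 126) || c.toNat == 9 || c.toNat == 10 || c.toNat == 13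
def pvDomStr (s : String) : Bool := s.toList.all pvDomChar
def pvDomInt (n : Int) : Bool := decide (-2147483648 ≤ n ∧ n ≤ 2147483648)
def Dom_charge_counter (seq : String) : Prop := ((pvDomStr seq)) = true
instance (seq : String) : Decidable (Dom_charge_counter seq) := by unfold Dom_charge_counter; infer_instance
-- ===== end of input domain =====

-- B builds a full character histogram (dict) in one pass and then combines four fixed
-- lookups R+K-D-E, instead of A's index-driven loop with two if/elif branch counters (idiomatic).


-- ===== PORT A =====
-- for res in range(len(seq)): accumulate (neg, pos) by branching on seq[res]
def chargeStepA (np : Int × Int) (c : Char) : Int × Int :=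
  if c = 'D' ∨ c = 'E' then (np.1 + 1, np.2)
  else if c = 'R' ∨ c = 'K' then (np.1, np.2 + 1)
  else np

def charge_counter (seq : String) : Int :=
  let st := (PySem.List.pyRange 0 (PySem.Str.len seq) 1).foldl
    (fun np res =>
      match PySem.Str.pyGet? seq res with
      | some c => chargeStepA np c
      | none => np) ((0 : Int), (0 : Int))
  st.2 - st.1

-- ===== PORT B =====
def charge_counter_alt (seq : String) : Int :=
  let hist : PySem.Dict Char Int :=
    seq.toList.foldl (fun d c => d.insert c (d.getD c 0 + 1)) PySem.Dict.empty
  hist.getD 'R' 0 + hist.getD 'K' 0 - hist.getD 'D' 0 - hist.getD 'E' 0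

-- ===== PRECONDITION & SPEC =====
def Spec_charge_counter (seq : String) (out : Int) : Prop := out = charge_counter_alt seq
instance (seq : String) (out : Int) : Decidable (Spec_charge_counter seq out) := by unfold Spec_charge_counter; infer_instance

-- ===== CLAIM (what is proved, stated in full; the proofs are below) =====
def Claim_equal_charge_counter : Prop := ∀ (seq : String), Dom_charge_counter seq → Spec_charge_counter seq (charge_counter seq)

-- ===== LEMMAS AND PROOFS =====

-- the index-driven fold over pyRange equals the structural fold over the characters
theorem indexed_fold_eq (l pre : List Char) (st : Int × Int) :
    (PySem.List.pyRange pre.length (pre.length + l.length) 1).foldl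
      (fun np res =>
        match PySem.List.pyGet? (pre ++ l) res with
        | some c => chargeStepA np c
        | none => np) st = l.foldl chargeStepA st := by
  induction l generalizing pre st with
  | nil => simp
  | cons c t ih =>
    have hlt : (pre.length : Int) < pre.length + (c :: t).length := by
      simp
    rw [PySem.List.pyRange_one_cons hlt]
    simp only [List.foldl_cons, PySem.List.pyGet?_append_length]
    have h1 : ((pre.length : Int) + 1) = ((pre ++ [c]).length : Int) := by
      simp
    have h2 : ((pre.length : Int) + (c :: t).length) = ((pre ++ [c]).length : Int) + t.length := by
      push_cast; simp; omega
    have h3 : pre ++ c :: t = (pre ++ [c]) ++ t := by simp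
    rw [h1, h2, h3, ih]

theorem foldA_count (l : List Char) (neg pos : Int) :
    l.foldl chargeStepA (neg, pos) =
      (neg + (l.count 'D' + l.count 'E'), pos + (l.count 'R' + l.count 'K')) := by
  induction l generalizing neg pos with
  | nil => simp
  | cons c t ih =>
    simp only [List.foldl_cons, chargeStepA]
    split_ifs with h1 h2
    · rcases h1 with h | h <;> subst h <;> simp [ih] <;> ring_nf
    · rcases h2 with h | h <;> subst h <;> simp [ih] <;> ring_nf
    · have : c ≠ 'D' ∧ c ≠ 'E' ∧ c ≠ 'R' ∧ c ≠ 'K' := by tauto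
      obtain ⟨hd, he, hr, hk⟩ := this
      simp [ih, hd, he, hr, hk]

theorem alt_count (seq : String) :
    charge_counter_alt seq =
      (seq.toList.count 'R' : Int) + seq.toList.count 'K'
        - seq.toList.count 'D' - seq.toList.count 'E' := by
  simp [charge_counter_alt, PySem.Dict.getD_foldl_insert_add_one, PySem.Dict.getD_empty]

-- ===== VERDICT (by name: the statement is the Claim_ definition above) =====
theorem charge_counter_spec : Claim_equal_charge_counter := by
  intro seq _
  unfold Spec_charge_counter charge_counter
  have hlen : PySem.Str.len seq = (seq.toList.length : Int) := by
    simp [PySem.Str.len_eq]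
  have hget : ∀ res, PySem.Str.pyGet? seq res = PySem.List.pyGet? seq.toList res := by
    intro res; simp [PySem.Str.pyGet?]
  simp only [hlen, hget]
  have h0 : ((0 : Int)) = (([] : List Char).length : Int) := by simp
  have := indexed_fold_eq seq.toList [] ((0 : Int), (0 : Int))
  simp only [List.length_nil, Int.natCast_zero, List.nil_append, zero_add] at this
  rw [this, foldA_count, alt_count]
  push_cast
  ring
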